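-- pv_equiv track=rewrite | github.com/and910805/task | desktop_quote_tool/app.py | _financial_group_to_text
-- ===== SOURCE A (Python) =====
-- FINANCIAL_DIGITS = ("零", "壹", "貳", "參", "肆", "伍", "陸", "柒", "捌", "玖")
--
-- FINANCIAL_SMALL_UNITS = ("", "拾", "佰", "仟")
--
-- def _financial_group_to_text(group_value: int) -> str:
--     if group_value <= 0:
--         return ""
--     text = ""
--     zero_pending = False
--     for unit_idx in range(3, -1, -1):
--         base = 10**unit_idx
--         digit = (group_value // base) % 10
--         if digit == 0:
--             if text:
--                 zero_pending = True
--             continue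
--         if zero_pending:
--             text += FINANCIAL_DIGITS[0]
--             zero_pending = False
--         text += FINANCIAL_DIGITS[digit] + FINANCIAL_SMALL_UNITS[unit_idx]
--     return text
-- ===== SOURCE B (Python) =====
-- FINANCIAL_DIGITS = ("零", "壹", "貳", "參", "肆", "伍", "陸", "柒", "捌", "玖")
--
-- FINANCIAL_SMALL_UNITS = ("", "拾", "佰", "仟")
--
--
-- def _financial_group_to_text(group_value: int) -> str:
--     if group_value <= 0:
--         return ""
--     pieces = []
--     for unit_idx in range(3, -1, -1):
--         digit = (group_value // 10**unit_idx) % 10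
--         if digit == 0:
--             pieces.append("零")
--         else:
--             pieces.append(FINANCIAL_DIGITS[digit] + FINANCIAL_SMALL_UNITS[unit_idx])
--     raw = "".join(pieces)
--     # collapse runs of 零 and strip leading/trailing 零 in one go
--     return "零".join(part for part in raw.split("零") if part)
-- ===== Notes on version B (the rewrite author's own statement) =====
-- stated objective: simpler
-- what changed: Replaces A's inline zero_pending state machine with a build-then-clean decomposition: emit one piece per digit position (a literal '零' for zero digits), then collapse runs of '零' and strip leading/trailing '零' in one split/filter/join pass.
import Mathlib
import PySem

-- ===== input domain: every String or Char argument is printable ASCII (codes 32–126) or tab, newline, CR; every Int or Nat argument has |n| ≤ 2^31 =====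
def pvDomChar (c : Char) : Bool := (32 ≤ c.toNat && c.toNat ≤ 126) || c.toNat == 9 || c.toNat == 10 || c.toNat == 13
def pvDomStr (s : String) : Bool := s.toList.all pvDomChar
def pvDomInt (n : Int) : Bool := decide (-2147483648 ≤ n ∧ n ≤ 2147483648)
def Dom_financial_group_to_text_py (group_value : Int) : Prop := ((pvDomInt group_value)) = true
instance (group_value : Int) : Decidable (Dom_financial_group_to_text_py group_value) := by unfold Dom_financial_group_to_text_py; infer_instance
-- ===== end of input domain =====

-- B replaces A's inline zero_pending state machine by a simpler build-then-clean
-- decomposition: emit one piece per position ("零" for zero digits), then collapse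
-- and strip the zero runs with split/filter/join (objective: simpler).

-- ===== PORT A =====
def finDigits : List String := ["零","壹","貳","參","肆","伍","陸","柒","捌","玖"]
def finUnits : List String := ["", "拾", "佰", "仟"]

-- Loop state is (text, zero_pending).  '10**unit_idx' is ported as
-- (10:Int) ^ unit_idx.toNat, exact here since unit_idx ranges over [3,2,1,0] (all ≥ 0).
-- FINANCIAL_DIGITS[digit] / FINANCIAL_SMALL_UNITS[unit_idx]: the indices are always in
-- range (digit = … % 10 ∈ [0,10), unit_idx ∈ [0,3]), so pyGet? is always `some`
-- and the `.getD ""` default is never taken.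
def financial_group_to_text_py (group_value : Int) : String :=
  if group_value ≤ 0 then ""
  else
    ((PySem.List.pyRange 3 (-1) (-1)).foldl (fun st unit_idx =>
      let base : Int := (10:Int) ^ unit_idx.toNat
      let digit := PySem.Int.mod (PySem.Int.floordiv group_value base) 10
      if digit = 0 then
        (if st.1 ≠ "" then (st.1, true) else st)
      else
        let st' : String × Bool := if st.2 then (st.1 ++ "零", false) else st
        (st'.1 ++ ((PySem.List.pyGet? finDigits digit).getD "") ++
          ((PySem.List.pyGet? finUnits unit_idx).getD ""), st'.2))
      ("", false)).1

-- ===== PORT B =====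
-- raw = "".join(pieces) built by one loop over range(3,-1,-1); then
-- "零".join(part for part in raw.split("零") if part) collapses runs and strips ends.
-- raw.split("零"): the separator is nonempty, so split? is always `some` and the
-- `.getD []` default is never taken.
def financial_group_to_text_py_alt (group_value : Int) : String :=
  if group_value ≤ 0 then ""
  else
    let raw := PySem.Str.join "" ((PySem.List.pyRange 3 (-1) (-1)).map (fun unit_idx =>
      let digit := PySem.Int.mod (PySem.Int.floordiv group_value ((10:Int) ^ unit_idx.toNat)) 10
      if digit = 0 then "零"
      else ((PySem.List.pyGet? finDigits digit).getD "") ++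
        ((PySem.List.pyGet? finUnits unit_idx).getD "")))
    PySem.Str.join "零" (((PySem.Str.split? raw "零").getD []).filter (fun p => p ≠ ""))

-- ===== PRECONDITION & SPEC =====
def Spec_financial_group_to_text_py (group_value : Int) (out : String) : Prop := out = financial_group_to_text_py_alt group_value
instance (group_value : Int) (out : String) : Decidable (Spec_financial_group_to_text_py group_value out) := by unfold Spec_financial_group_to_text_py; infer_instance

-- ===== CLAIM (what is proved, stated in full; the proofs are below) =====
def Claim_equal_financial_group_to_text_py : Prop := ∀ (group_value : Int), Dom_financial_group_to_text_py group_value → Spec_financial_group_to_text_py group_value (financial_group_to_text_py group_value)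

-- ===== LEMMAS AND PROOFS =====

-- the digit of group_value at position i, i.e. (group_value // 10**i) % 10
def pvDigit (v i : Int) : Int := PySem.Int.mod (PySem.Int.floordiv v ((10:Int) ^ i.toNat)) 10

-- A's loop body with the digit abstracted out (String level)
def pvStepA (st : String × Bool) (digit unit_idx : Int) : String × Bool :=
  if digit = 0 then
    (if st.1 ≠ "" then (st.1, true) else st)
  else
    let st' : String × Bool := if st.2 then (st.1 ++ "零", false) else st
    (st'.1 ++ ((PySem.List.pyGet? finDigits digit).getD "") ++
      ((PySem.List.pyGet? finUnits unit_idx).getD ""), st'.2)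

def pvCoreA (d3 d2 d1 d0 : Int) : String :=
  (pvStepA (pvStepA (pvStepA (pvStepA ("", false) d3 3) d2 2) d1 1) d0 0).1

-- B's per-position piece with the digit abstracted out (String level)
def pvPieceB (digit unit_idx : Int) : String :=
  if digit = 0 then "零"
  else ((PySem.List.pyGet? finDigits digit).getD "") ++
    ((PySem.List.pyGet? finUnits unit_idx).getD "")

def pvCoreB (d3 d2 d1 d0 : Int) : String :=
  PySem.Str.join "零"
    ((((PySem.Str.split?
        (PySem.Str.join "" [pvPieceB d3 3, pvPieceB d2 2, pvPieceB d1 1, pvPieceB d0 0]) "零")).getD []).filter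
      (fun p => p ≠ ""))

-- List Char mirrors of the two cores (for a fast kernel evaluation)
def finDigitsC : List (List Char) := finDigits.map String.toList
def finUnitsC : List (List Char) := finUnits.map String.toList
def pvZ : List Char := "零".toList

def pvStepAC (st : List Char × Bool) (digit unit_idx : Int) : List Char × Bool :=
  if digit = 0 then
    (if st.1 ≠ [] then (st.1, true) else st)
  else
    let st' : List Char × Bool := if st.2 then (st.1 ++ pvZ, false) else st
    (st'.1 ++ ((PySem.List.pyGet? finDigitsC digit).getD []) ++
      ((PySem.List.pyGet? finUnitsC unit_idx).getD []), st'.2)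

def pvCoreAC (d3 d2 d1 d0 : Int) : List Char :=
  (pvStepAC (pvStepAC (pvStepAC (pvStepAC ([], false) d3 3) d2 2) d1 1) d0 0).1

def pvPieceBC (digit unit_idx : Int) : List Char :=
  if digit = 0 then pvZ
  else ((PySem.List.pyGet? finDigitsC digit).getD []) ++
    ((PySem.List.pyGet? finUnitsC unit_idx).getD [])

def pvCoreBC (d3 d2 d1 d0 : Int) : List Char :=
  PySem.Chars.join pvZ
    ((((PySem.Chars.split?
        (PySem.Chars.join [] [pvPieceBC d3 3, pvPieceBC d2 2, pvPieceBC d1 1, pvPieceBC d0 0]) pvZ)).getD []).filter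
      (fun p => p ≠ []))

lemma pyRange_3down : PySem.List.pyRange 3 (-1) (-1) = [3, 2, 1, 0] := by decide

lemma portA_eq_core (v : Int) (h : ¬ v ≤ 0) :
    financial_group_to_text_py v =
      pvCoreA (pvDigit v 3) (pvDigit v 2) (pvDigit v 1) (pvDigit v 0) := by
  unfold financial_group_to_text_py
  rw [if_neg h, pyRange_3down]
  rfl

lemma portB_eq_core (v : Int) (h : ¬ v ≤ 0) :
    financial_group_to_text_py_alt v =
      pvCoreB (pvDigit v 3) (pvDigit v 2) (pvDigit v 1) (pvDigit v 0) := by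
  unfold financial_group_to_text_py_alt
  rw [if_neg h, pyRange_3down]
  rfl

-- bridge: pyGet?-then-default commutes with String.toList
lemma getD_toList_map (xs : List String) (i : Int) :
    ((PySem.List.pyGet? xs i).getD "").toList =
      (PySem.List.pyGet? (xs.map String.toList) i).getD [] := by
  unfold PySem.List.pyGet?
  simp only [List.length_map]
  cases PySem.List.pyIdx? xs.length i with
  | none => simp
  | some k => cases h : xs[k]? <;> simp [List.getElem?_map, h]

lemma stepA_bridge (st : String × Bool) (d i : Int) :
    ((pvStepA st d i).1.toList, (pvStepA st d i).2) = pvStepAC (st.1.toList, st.2) d i := by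
  unfold pvStepA pvStepAC
  by_cases hd : d = 0
  · by_cases he : st.1 = "" <;>
      simp [hd, he, String.toList_eq_nil_iff, -ne_eq, Ne]
  · cases hb : st.2 <;>
      simp [hd, hb, String.toList_append, getD_toList_map, finDigitsC, finUnitsC, pvZ]

lemma coreA_bridge (d3 d2 d1 d0 : Int) :
    (pvCoreA d3 d2 d1 d0).toList = pvCoreAC d3 d2 d1 d0 := by
  have e1 : ((pvStepA ("", false) d3 3).1.toList, (pvStepA ("", false) d3 3).2) =
      pvStepAC ([], false) d3 3 := stepA_bridge ("", false) d3 3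
  have e2 := stepA_bridge (pvStepA ("", false) d3 3) d2 2
  rw [e1] at e2
  have e3 := stepA_bridge (pvStepA (pvStepA ("", false) d3 3) d2 2) d1 1
  rw [e2] at e3
  have e4 := stepA_bridge (pvStepA (pvStepA (pvStepA ("", false) d3 3) d2 2) d1 1) d0 0
  rw [e3] at e4
  unfold pvCoreA pvCoreAC
  exact congrArg Prod.fst e4

lemma pieceB_bridge (d i : Int) : (pvPieceB d i).toList = pvPieceBC d i := by
  unfold pvPieceB pvPieceBC
  by_cases hd : d = 0 <;>
    simp [hd, String.toList_append, getD_toList_map, finDigitsC, finUnitsC, pvZ]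

lemma filter_ne_empty_bridge (xs : List String) :
    (xs.filter (fun p => p ≠ "")).map String.toList =
      (xs.map String.toList).filter (fun p => p ≠ []) := by
  induction xs with
  | nil => rfl
  | cons x xs ih =>
    simp only [List.filter_cons, List.map_cons]
    by_cases hx : x = ""
    · simpa [hx] using ih
    · have hx' : x.toList ≠ [] := by simpa [String.toList_eq_nil_iff] using hx
      simpa [hx, hx'] using ih

lemma split_getD_bridge (s sep : String) :
    ((PySem.Str.split? s sep).getD []).map String.toList =
      (PySem.Chars.split? s.toList sep.toList).getD [] := by
  have hm := PySem.Str.split?_map s sep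
  cases hs : PySem.Str.split? s sep with
  | none =>
    rw [hs] at hm
    simp only [Option.map_none] at hm
    rw [← hm]
    rfl
  | some parts =>
    rw [hs] at hm
    simp only [Option.map_some] at hm
    rw [← hm]
    rfl

lemma coreB_bridge (d3 d2 d1 d0 : Int) :
    (pvCoreB d3 d2 d1 d0).toList = pvCoreBC d3 d2 d1 d0 := by
  unfold pvCoreB pvCoreBC
  rw [PySem.Str.toList_join, filter_ne_empty_bridge,
    split_getD_bridge _ _, PySem.Str.toList_join]
  simp [List.map_cons, pieceB_bridge, pvZ]

set_option maxHeartbeats 12000000 in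
lemma coreC_eq_fin : ∀ (a b c d : Fin 10),
    pvCoreAC (a : Int) (b : Int) (c : Int) (d : Int) =
      pvCoreBC (a : Int) (b : Int) (c : Int) (d : Int) := by decide

lemma core_eq_int (d3 d2 d1 d0 : Int)
    (h3 : 0 ≤ d3 ∧ d3 < 10) (h2 : 0 ≤ d2 ∧ d2 < 10)
    (h1 : 0 ≤ d1 ∧ d1 < 10) (h0 : 0 ≤ d0 ∧ d0 < 10) :
    pvCoreA d3 d2 d1 d0 = pvCoreB d3 d2 d1 d0 := by
  have h := coreC_eq_fin ⟨d3.toNat, by omega⟩ ⟨d2.toNat, by omega⟩ ⟨d1.toNat, by omega⟩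
    ⟨d0.toNat, by omega⟩
  simp only [Int.toNat_of_nonneg h3.1, Int.toNat_of_nonneg h2.1,
    Int.toNat_of_nonneg h1.1, Int.toNat_of_nonneg h0.1] at h
  apply String.toList_inj.mp
  rw [coreA_bridge, coreB_bridge]
  exact h

lemma digit_bounds (v i : Int) : 0 ≤ pvDigit v i ∧ pvDigit v i < 10 :=
  ⟨PySem.Int.mod_nonneg _ (by norm_num), PySem.Int.mod_lt _ (by norm_num)⟩

-- ===== VERDICT (by name: the statement is the Claim_ definition above) =====
theorem financial_group_to_text_py_spec : Claim_equal_financial_group_to_text_py := by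
  intro v _
  unfold Spec_financial_group_to_text_py
  by_cases h : v ≤ 0
  · simp [financial_group_to_text_py, financial_group_to_text_py_alt, h]
  · rw [portA_eq_core v h, portB_eq_core v h]
    exact core_eq_int _ _ _ _ (digit_bounds v 3) (digit_bounds v 2) (digit_bounds v 1)
      (digit_bounds v 0)
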